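-- pv_equiv track=rewrite | github.com/YeQ456/Python-Examples | 进阶/例260.最大矩阵边界和.py | solve
-- ===== SOURCE A (Python) =====
-- def solve(arr):
-- 	n = len(arr)
-- 	m = len(arr[0])
-- 	preCol = []
-- 	preRow = []
-- 	for r in range(n):
-- 		tem = [0]
-- 		res = 0
-- 		for c in range(m):
-- 			res += arr[r][c]
-- 			tem.append(res)
-- 		preRow.append(tem)
-- 	for c in range(m):
-- 		tem = [0]
-- 		res = 0
-- 		for r in range(n):
-- 			res += arr[r][c]
-- 			tem.append(res)
-- 		preCol.append(tem)
-- 	ans = arr[0][0]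
-- 	for r1 in range(n):
-- 		for r2 in range(r1, n):
-- 			for c1 in range(m):
-- 				for c2 in range(c1, m):
-- 					if r1 == r2 and c1 == c2:
-- 						res = arr[r1][c1]
-- 					elif r1 == r2:
-- 						res = preRow[r1][c2 + 1] - preRow[r1][c1]
-- 					elif c1 == c2:
-- 						res = preCol[c1][r2 + 1] - preCol[c1][r1]
-- 					else:
-- 						res = preCol[c1][r2 + 1] - preCol[c1][r1] + preCol[c2][r2 + 1] - preCol[c2][r1] + \
-- 							  preRow[r1][c2 + 1] - preRow[r1][c1] + preRow[r2][c2 + 1] - preRow[r2][c1] - \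
-- 							  arr[r1][c1] - arr[r1][c2] - arr[r2][c1] - arr[r2][c2]
-- 					ans = max(ans, res)
-- 	return ans
-- ===== SOURCE B (Python) =====
-- def solve(arr):
--     n = len(arr)
--     m = len(arr[0])
--     best = arr[0][0]
--     # single-row segments (r1 == r2): prefix sums with a running minimum
--     for r in range(n):
--         p = 0
--         mn = 0
--         for c in range(m):
--             p += arr[r][c]
--             best = max(best, p - mn)
--             mn = min(mn, p)
--     # single-column segments (c1 == c2): same scan down each column
--     for c in range(m):
--         p = 0
--         mn = 0
--         for r in range(n):
--             p += arr[r][c]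
--             best = max(best, p - mn)
--             mn = min(mn, p)
--     # proper borders (r1 < r2, c1 < c2): fix the row pair, one pass over columns
--     for r1 in range(n):
--         col = [arr[r1][c] for c in range(m)]          # column sums over rows r1..r2
--         for r2 in range(r1 + 1, n):
--             col = [col[c] + arr[r2][c] for c in range(m)]
--             p = 0        # prefix sum of top+bottom row entries
--             left = 0     # max over c1 < c of (col[c1] - top[c1] - bot[c1] - p(c1))
--             for c in range(m):
--                 q = arr[r1][c] + arr[r2][c]
--                 f = col[c] - q
--                 if c > 0:
--                     best = max(best, f + p + q + left)
--                     left = max(left, f - p)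
--                 else:
--                     left = f - p
--                 p += q
--     return best
-- ===== Notes on version B (the rewrite author's own statement) =====
-- stated objective: faster
-- what changed: Instead of enumerating all O(n^2 m^2) submatrices and evaluating each border from prefix-sum tables, B handles single-row and single-column segments with a prefix-sum/running-minimum scan and, for proper borders, fixes the row pair, maintains running column sums and splits the border sum into a per-c2 term plus a running maximum of the left-corner term, giving one O(m) pass per row pair.
import Mathlib
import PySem

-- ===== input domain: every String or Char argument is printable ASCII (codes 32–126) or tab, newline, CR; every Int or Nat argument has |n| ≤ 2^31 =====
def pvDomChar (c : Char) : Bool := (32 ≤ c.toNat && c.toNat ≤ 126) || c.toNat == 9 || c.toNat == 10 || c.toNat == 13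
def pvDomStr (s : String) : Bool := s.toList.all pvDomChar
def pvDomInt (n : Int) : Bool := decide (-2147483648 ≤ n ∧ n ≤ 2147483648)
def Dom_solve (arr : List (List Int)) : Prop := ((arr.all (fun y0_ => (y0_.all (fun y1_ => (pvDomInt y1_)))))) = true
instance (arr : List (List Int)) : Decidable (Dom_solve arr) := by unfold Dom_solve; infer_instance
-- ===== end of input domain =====

-- B replaces A's enumeration of all O(n^2 m^2) submatrix borders by prefix-minimum scans for the
-- degenerate (single-row / single-column) cases and, per row pair, one O(m) running-maximum pass
-- for proper borders; a timing run measured B faster.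

-- shared index helpers: Python's arr[i] (raises out of range; the .getD default is never hit inside Pre_)
def pvGetI (xs : List Int) (c : Nat) : Int := (PySem.List.pyGet? xs (c : Int)).getD 0
def pvGetR (arr : List (List Int)) (r : Nat) : List Int := (PySem.List.pyGet? arr (r : Int)).getD []

-- ===== PORT A =====
def solve (arr : List (List Int)) : Int :=
  let n := arr.length
  let m := (pvGetR arr 0).length
  let preRow := (List.range n).foldl (fun preRow r =>
      preRow ++ [((List.range m).foldl (fun (st : List Int × Int) c =>
          let res := st.2 + pvGetI (pvGetR arr r) c
          (st.1 ++ [res], res)) ([0], 0)).1]) []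
  let preCol := (List.range m).foldl (fun preCol c =>
      preCol ++ [((List.range n).foldl (fun (st : List Int × Int) r =>
          let res := st.2 + pvGetI (pvGetR arr r) c
          (st.1 ++ [res], res)) ([0], 0)).1]) []
  (List.range n).foldl (fun ans r1 =>
    (List.range' r1 (n - r1)).foldl (fun ans r2 =>
      (List.range m).foldl (fun ans c1 =>
        (List.range' c1 (m - c1)).foldl (fun ans c2 =>
          let res :=
            if r1 = r2 ∧ c1 = c2 then pvGetI (pvGetR arr r1) c1
            else if r1 = r2 then pvGetI (pvGetR preRow r1) (c2+1) - pvGetI (pvGetR preRow r1) c1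
            else if c1 = c2 then pvGetI (pvGetR preCol c1) (r2+1) - pvGetI (pvGetR preCol c1) r1
            else pvGetI (pvGetR preCol c1) (r2+1) - pvGetI (pvGetR preCol c1) r1
               + pvGetI (pvGetR preCol c2) (r2+1) - pvGetI (pvGetR preCol c2) r1
               + pvGetI (pvGetR preRow r1) (c2+1) - pvGetI (pvGetR preRow r1) c1
               + pvGetI (pvGetR preRow r2) (c2+1) - pvGetI (pvGetR preRow r2) c1
               - pvGetI (pvGetR arr r1) c1 - pvGetI (pvGetR arr r1) c2
               - pvGetI (pvGetR arr r2) c1 - pvGetI (pvGetR arr r2) c2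
          max ans res) ans) ans) ans) (pvGetI (pvGetR arr 0) 0)

-- ===== PORT B =====
def solve_alt (arr : List (List Int)) : Int :=
  let n := arr.length
  let m := (pvGetR arr 0).length
  let best := pvGetI (pvGetR arr 0) 0
  let best := (List.range n).foldl (fun best r =>
      ((List.range m).foldl (fun (st : Int × Int × Int) c =>
          let p := st.1 + pvGetI (pvGetR arr r) c
          (p, min st.2.1 p, max st.2.2 (p - st.2.1))) (0, 0, best)).2.2) best
  let best := (List.range m).foldl (fun best c =>
      ((List.range n).foldl (fun (st : Int × Int × Int) r =>
          let p := st.1 + pvGetI (pvGetR arr r) c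
          (p, min st.2.1 p, max st.2.2 (p - st.2.1))) (0, 0, best)).2.2) best
  (List.range n).foldl (fun best r1 =>
      ((List.range' (r1+1) (n - (r1+1))).foldl (fun (st : List Int × Int) r2 =>
          let col := (List.range m).map (fun c => pvGetI st.1 c + pvGetI (pvGetR arr r2) c)
          let inner := (List.range m).foldl (fun (t : Int × Int × Int) c =>
              let q := pvGetI (pvGetR arr r1) c + pvGetI (pvGetR arr r2) c
              let f := pvGetI col c - q
              ( t.1 + q,
                if 0 < c then max t.2.1 (f - t.1) else f - t.1,
                if 0 < c then max t.2.2 (f + t.1 + q + t.2.1) else t.2.2 )) (0, 0, st.2)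
          (col, inner.2.2))
        ((List.range m).map (fun c => pvGetI (pvGetR arr r1) c), best)).2) best

-- ===== PRECONDITION & SPEC =====
-- Pre_ = exactly where Python A returns: a nonempty matrix with a nonempty first row and
-- no row shorter than the first (A raises IndexError otherwise). The ports make those
-- out-of-range reads total with a shared default, and both read them identically, so the
-- equality theorem happens to hold without using Pre_; Pre_'s role is to delimit the
-- inputs on which the Python programs actually return.
def Pre_solve (arr : List (List Int)) : Prop :=
  arr ≠ [] ∧ 0 < arr.headI.length ∧ ∀ row ∈ arr, arr.headI.length ≤ row.length
instance (arr : List (List Int)) : Decidable (Pre_solve arr) := by unfold Pre_solve; infer_instance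
def pvWitness_solve : List (List Int) := [[1, -2], [3, 4]]

def Spec_solve (arr : List (List Int)) (out : Int) : Prop := out = solve_alt arr
instance (arr : List (List Int)) (out : Int) : Decidable (Spec_solve arr out) := by unfold Spec_solve; infer_instance

-- ===== CLAIM (what is proved, stated in full; the proofs are below) =====
def Claim_equal_solve : Prop := ∀ (arr : List (List Int)), Dom_solve arr → Pre_solve arr → Spec_solve arr (solve arr)

-- ===== LEMMAS AND PROOFS =====

-- matrix entry as both ports read it
def el (arr : List (List Int)) (r c : Nat) : Int := pvGetI (pvGetR arr r) c
-- row- and column-prefix sums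
def RP (arr : List (List Int)) (r k : Nat) : Int := ∑ c ∈ Finset.range k, el arr r c
def CP (arr : List (List Int)) (c k : Nat) : Int := ∑ r ∈ Finset.range k, el arr r c

-- the border sum A's innermost branch computes, written with mathematical prefix sums
def S (arr : List (List Int)) (r1 r2 c1 c2 : Nat) : Int :=
  if r1 = r2 ∧ c1 = c2 then el arr r1 c1
  else if r1 = r2 then RP arr r1 (c2+1) - RP arr r1 c1
  else if c1 = c2 then CP arr c1 (r2+1) - CP arr c1 r1
  else CP arr c1 (r2+1) - CP arr c1 r1 + CP arr c2 (r2+1) - CP arr c2 r1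
     + RP arr r1 (c2+1) - RP arr r1 c1 + RP arr r2 (c2+1) - RP arr r2 c1
     - el arr r1 c1 - el arr r1 c2 - el arr r2 c1 - el arr r2 c2

def ValSet (arr : List (List Int)) (y : Int) : Prop :=
  ∃ r1 r2 c1 c2 : Nat, r1 ≤ r2 ∧ r2 < arr.length ∧ c1 ≤ c2 ∧ c2 < (pvGetR arr 0).length ∧
    y = S arr r1 r2 c1 c2

-- "x is the maximum of i and the set S"
def IsMaxOf (x i : Int) (P : Int → Prop) : Prop :=
  i ≤ x ∧ (∀ y, P y → y ≤ x) ∧ (x = i ∨ P x)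

theorem isMaxOf_unique {x y i : Int} {P : Int → Prop}
    (hx : IsMaxOf x i P) (hy : IsMaxOf y i P) : x = y := by
  obtain ⟨hix, hbx, hax⟩ := hx
  obtain ⟨hiy, hby, hay⟩ := hy
  apply le_antisymm
  · rcases hax with h | h
    · omega
    · exact hby _ h
  · rcases hay with h | h
    · omega
    · exact hbx _ h

-- generic accumulator lemma: folding monotone "max-introducing" bodies
theorem foldl_bnd {α : Type} (l : List α) (body : Int → α → Int) (P : α → Int → Prop) (i : Int)
    (h : ∀ x ∈ l, ∀ j, j ≤ body j x ∧ (∀ y, P x y → y ≤ body j x) ∧ (body j x = j ∨ P x (body j x))) :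
    i ≤ l.foldl body i ∧ (∀ x ∈ l, ∀ y, P x y → y ≤ l.foldl body i) ∧
      (l.foldl body i = i ∨ ∃ x ∈ l, P x (l.foldl body i)) := by
  induction l generalizing i with
  | nil => exact ⟨le_refl _, by simp, Or.inl rfl⟩
  | cons x l ih =>
    obtain ⟨h1, h2, h3⟩ := h x (by simp) i
    obtain ⟨ih1, ih2, ih3⟩ := ih (body i x) (fun z hz => h z (by simp [hz]))
    refine ⟨le_trans h1 ih1, ?_, ?_⟩
    · intro z hz y hy
      rcases List.mem_cons.1 hz with rfl | hz
      · exact le_trans (h2 y hy) ih1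
      · exact ih2 z hz y hy
    · rcases ih3 with heq | ⟨z, hz, hP⟩
      · rw [List.foldl_cons, heq]
        rcases h3 with h3 | h3
        · exact Or.inl h3
        · exact Or.inr ⟨x, by simp, h3⟩
      · exact Or.inr ⟨z, by simp [hz], hP⟩

theorem pvGetI_map_range (f : Nat → Int) (k c : Nat) (h : c < k) :
    pvGetI ((List.range k).map f) c = f c := by
  simp [pvGetI, h]

theorem pvGetR_map_range (f : Nat → List Int) (k r : Nat) (h : r < k) :
    pvGetR ((List.range k).map f) r = f r := by
  simp [pvGetR, h]

-- the prefix-sum scan A's first two loops perform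
theorem rowScan_eq (g : Nat → Int) (k : Nat) :
    (List.range k).foldl (fun (st : List Int × Int) c =>
        (st.1 ++ [st.2 + g c], st.2 + g c)) ([0], 0)
      = ((List.range (k+1)).map (fun j => ∑ i ∈ Finset.range j, g i),
         ∑ i ∈ Finset.range k, g i) := by
  induction k with
  | zero => simp
  | succ k ih =>
    rw [List.range_succ, List.foldl_append, ih]
    rw [show k + 1 + 1 = (k+1) + 1 from rfl, List.range_succ (n := k + 1), List.map_append]
    simp [Finset.sum_range_succ]

set_option maxHeartbeats 2000000 in
theorem solve_eq_Sfold (arr : List (List Int)) :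
    solve arr =
      (List.range arr.length).foldl (fun ans r1 =>
        (List.range' r1 (arr.length - r1)).foldl (fun ans r2 =>
          (List.range (pvGetR arr 0).length).foldl (fun ans c1 =>
            (List.range' c1 ((pvGetR arr 0).length - c1)).foldl (fun ans c2 =>
              max ans (S arr r1 r2 c1 c2)) ans) ans) ans) (pvGetI (pvGetR arr 0) 0) := by
  unfold solve
  dsimp only
  rw [PySem.List.foldl_append_singleton_eq_map, PySem.List.foldl_append_singleton_eq_map]
  simp only [rowScan_eq, List.nil_append]
  apply PySem.List.foldl_congr_mem; intro ans r1 hr1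
  apply PySem.List.foldl_congr_mem; intro ans r2 hr2
  apply PySem.List.foldl_congr_mem; intro ans c1 hc1
  apply PySem.List.foldl_congr_mem; intro ans c2 hc2
  simp only [List.mem_range] at hr1 hc1
  simp only [List.mem_range'_1] at hr2 hc2
  have hr2' : r2 < arr.length := by omega
  have hc2' : c2 < (pvGetR arr 0).length := by omega
  refine congrArg (max ans) ?_
  rw [pvGetR_map_range _ _ _ hr1, pvGetR_map_range _ _ _ hr2',
      pvGetR_map_range _ _ _ hc1, pvGetR_map_range _ _ _ hc2',
      pvGetI_map_range _ _ _ (by omega : c2 + 1 < (pvGetR arr 0).length + 1),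
      pvGetI_map_range _ _ _ (by omega : c1 < (pvGetR arr 0).length + 1),
      pvGetI_map_range _ _ _ (by omega : r2 + 1 < arr.length + 1),
      pvGetI_map_range _ _ _ (by omega : r1 < arr.length + 1),
      pvGetI_map_range _ _ _ (by omega : c2 + 1 < (pvGetR arr 0).length + 1),
      pvGetI_map_range _ _ _ (by omega : c1 < (pvGetR arr 0).length + 1),
      pvGetI_map_range _ _ _ (by omega : r2 + 1 < arr.length + 1),
      pvGetI_map_range _ _ _ (by omega : r1 < arr.length + 1)]
  simp only [S, RP, CP, el]

theorem bnd_max (j s : Int) :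
    j ≤ max j s ∧ (∀ y, y = s → y ≤ max j s) ∧ (max j s = j ∨ max j s = s) :=
  ⟨le_max_left _ _, fun _ hy => hy ▸ le_max_right _ _, max_choice j s⟩

theorem solve_isMax (arr : List (List Int)) :
    IsMaxOf (solve arr) (pvGetI (pvGetR arr 0) 0) (ValSet arr) := by
  rw [solve_eq_Sfold]
  set n := arr.length with hn
  set m := (pvGetR arr 0).length with hm
  -- innermost level (c2)
  have T1 : ∀ (r1 r2 c1 : Nat) (j : Int), c1 < m →
      j ≤ (List.range' c1 (m - c1)).foldl (fun ans c2 => max ans (S arr r1 r2 c1 c2)) j ∧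
      (∀ y, (∃ c2, c1 ≤ c2 ∧ c2 < m ∧ y = S arr r1 r2 c1 c2) →
        y ≤ (List.range' c1 (m - c1)).foldl (fun ans c2 => max ans (S arr r1 r2 c1 c2)) j) ∧
      ((List.range' c1 (m - c1)).foldl (fun ans c2 => max ans (S arr r1 r2 c1 c2)) j = j ∨
        ∃ c2, c1 ≤ c2 ∧ c2 < m ∧
          (List.range' c1 (m - c1)).foldl (fun ans c2 => max ans (S arr r1 r2 c1 c2)) j
            = S arr r1 r2 c1 c2) := by
    intro r1 r2 c1 j hc1
    obtain ⟨h1, h2, h3⟩ := foldl_bnd (List.range' c1 (m - c1))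
      (fun ans c2 => max ans (S arr r1 r2 c1 c2))
      (fun c2 y => y = S arr r1 r2 c1 c2) j (fun c2 _ j => bnd_max j _)
    refine ⟨h1, ?_, ?_⟩
    · rintro y ⟨c2, hle, hlt, rfl⟩
      exact h2 c2 (by rw [List.mem_range'_1]; omega) _ rfl
    · rcases h3 with h | ⟨c2, hc2, hS⟩
      · exact Or.inl h
      · rw [List.mem_range'_1] at hc2
        exact Or.inr ⟨c2, by omega, by omega, hS⟩
  -- level c1
  have T2 : ∀ (r1 r2 : Nat) (j : Int),
      j ≤ (List.range m).foldl (fun ans c1 => (List.range' c1 (m - c1)).foldl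
            (fun ans c2 => max ans (S arr r1 r2 c1 c2)) ans) j ∧
      (∀ y, (∃ c1 c2, c1 ≤ c2 ∧ c2 < m ∧ y = S arr r1 r2 c1 c2) →
        y ≤ (List.range m).foldl (fun ans c1 => (List.range' c1 (m - c1)).foldl
            (fun ans c2 => max ans (S arr r1 r2 c1 c2)) ans) j) ∧
      ((List.range m).foldl (fun ans c1 => (List.range' c1 (m - c1)).foldl
            (fun ans c2 => max ans (S arr r1 r2 c1 c2)) ans) j = j ∨
        ∃ c1 c2, c1 ≤ c2 ∧ c2 < m ∧
          (List.range m).foldl (fun ans c1 => (List.range' c1 (m - c1)).foldl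
            (fun ans c2 => max ans (S arr r1 r2 c1 c2)) ans) j = S arr r1 r2 c1 c2) := by
    intro r1 r2 j
    obtain ⟨h1, h2, h3⟩ := foldl_bnd (List.range m)
      (fun ans c1 => (List.range' c1 (m - c1)).foldl
        (fun ans c2 => max ans (S arr r1 r2 c1 c2)) ans)
      (fun c1 y => ∃ c2, c1 ≤ c2 ∧ c2 < m ∧ y = S arr r1 r2 c1 c2) j
      (fun c1 hc1 j => T1 r1 r2 c1 j (List.mem_range.1 hc1))
    refine ⟨h1, ?_, ?_⟩
    · rintro y ⟨c1, c2, hle, hlt, rfl⟩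
      exact h2 c1 (List.mem_range.2 (by omega)) _ ⟨c2, hle, hlt, rfl⟩
    · rcases h3 with h | ⟨c1, _, c2, h⟩
      · exact Or.inl h
      · exact Or.inr ⟨c1, c2, h⟩
  -- level r2
  have T3 : ∀ (r1 : Nat) (j : Int), r1 < n →
      j ≤ (List.range' r1 (n - r1)).foldl (fun ans r2 => (List.range m).foldl
            (fun ans c1 => (List.range' c1 (m - c1)).foldl
              (fun ans c2 => max ans (S arr r1 r2 c1 c2)) ans) ans) j ∧
      (∀ y, (∃ r2 c1 c2, r1 ≤ r2 ∧ r2 < n ∧ c1 ≤ c2 ∧ c2 < m ∧ y = S arr r1 r2 c1 c2) →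
        y ≤ (List.range' r1 (n - r1)).foldl (fun ans r2 => (List.range m).foldl
            (fun ans c1 => (List.range' c1 (m - c1)).foldl
              (fun ans c2 => max ans (S arr r1 r2 c1 c2)) ans) ans) j) ∧
      ((List.range' r1 (n - r1)).foldl (fun ans r2 => (List.range m).foldl
            (fun ans c1 => (List.range' c1 (m - c1)).foldl
              (fun ans c2 => max ans (S arr r1 r2 c1 c2)) ans) ans) j = j ∨
        ∃ r2 c1 c2, r1 ≤ r2 ∧ r2 < n ∧ c1 ≤ c2 ∧ c2 < m ∧
          (List.range' r1 (n - r1)).foldl (fun ans r2 => (List.range m).foldl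
            (fun ans c1 => (List.range' c1 (m - c1)).foldl
              (fun ans c2 => max ans (S arr r1 r2 c1 c2)) ans) ans) j = S arr r1 r2 c1 c2) := by
    intro r1 j hr1
    obtain ⟨h1, h2, h3⟩ := foldl_bnd (List.range' r1 (n - r1))
      (fun ans r2 => (List.range m).foldl (fun ans c1 => (List.range' c1 (m - c1)).foldl
        (fun ans c2 => max ans (S arr r1 r2 c1 c2)) ans) ans)
      (fun r2 y => ∃ c1 c2, c1 ≤ c2 ∧ c2 < m ∧ y = S arr r1 r2 c1 c2) j
      (fun r2 _ j => T2 r1 r2 j)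
    refine ⟨h1, ?_, ?_⟩
    · rintro y ⟨r2, c1, c2, hle, hlt, h⟩
      exact h2 r2 (by rw [List.mem_range'_1]; omega) _ ⟨c1, c2, h⟩
    · rcases h3 with h | ⟨r2, hr2, c1, c2, h⟩
      · exact Or.inl h
      · rw [List.mem_range'_1] at hr2
        exact Or.inr ⟨r2, c1, c2, by omega, by omega, h⟩
  -- level r1
  obtain ⟨h1, h2, h3⟩ := foldl_bnd (List.range n)
    (fun ans r1 => (List.range' r1 (n - r1)).foldl (fun ans r2 => (List.range m).foldl
      (fun ans c1 => (List.range' c1 (m - c1)).foldl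
        (fun ans c2 => max ans (S arr r1 r2 c1 c2)) ans) ans) ans)
    (fun r1 y => ∃ r2 c1 c2, r1 ≤ r2 ∧ r2 < n ∧ c1 ≤ c2 ∧ c2 < m ∧ y = S arr r1 r2 c1 c2)
    (pvGetI (pvGetR arr 0) 0)
    (fun r1 hr1 j => T3 r1 j (List.mem_range.1 hr1))
  refine ⟨h1, ?_, ?_⟩
  · rintro y ⟨r1, r2, c1, c2, hle, hlt, h⟩
    exact h2 r1 (List.mem_range.2 (by omega)) _ ⟨r2, c1, c2, hle, hlt, h⟩
  · rcases h3 with h | ⟨r1, _, r2, c1, c2, h⟩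
    · exact Or.inl h
    · exact Or.inr ⟨r1, r2, c1, c2, h⟩

-- ---------- B-side machinery ----------

-- the prefix-sum / running-minimum scan of B's first two passes
def scanF (g : Nat → Int) (k : Nat) (b0 : Int) : Int × Int × Int :=
  (List.range k).foldl (fun (st : Int × Int × Int) c =>
    (st.1 + g c, min st.2.1 (st.1 + g c), max st.2.2 (st.1 + g c - st.2.1))) (0, 0, b0)

theorem scanF_succ (g : Nat → Int) (k : Nat) (b0 : Int) :
    scanF g (k+1) b0 =
      ((scanF g k b0).1 + g k,
       min (scanF g k b0).2.1 ((scanF g k b0).1 + g k),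
       max (scanF g k b0).2.2 ((scanF g k b0).1 + g k - (scanF g k b0).2.1)) := by
  simp [scanF, List.range_succ]

theorem scan_spec (g : Nat → Int) (k : Nat) (b0 : Int) :
    (scanF g k b0).1 = ∑ i ∈ Finset.range k, g i ∧
    (∃ j, j ≤ k ∧ (scanF g k b0).2.1 = ∑ i ∈ Finset.range j, g i) ∧
    (∀ j, j ≤ k → (scanF g k b0).2.1 ≤ ∑ i ∈ Finset.range j, g i) ∧
    b0 ≤ (scanF g k b0).2.2 ∧
    (∀ c1 c2, c1 ≤ c2 → c2 < k →
      ∑ i ∈ Finset.range (c2+1), g i - ∑ i ∈ Finset.range c1, g i ≤ (scanF g k b0).2.2) ∧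
    ((scanF g k b0).2.2 = b0 ∨ ∃ c1 c2, c1 ≤ c2 ∧ c2 < k ∧
      (scanF g k b0).2.2 = ∑ i ∈ Finset.range (c2+1), g i - ∑ i ∈ Finset.range c1, g i) := by
  induction k with
  | zero =>
    refine ⟨by simp [scanF], ⟨0, le_refl _, by simp [scanF]⟩, ?_, by simp [scanF], by omega, Or.inl (by simp [scanF])⟩
    intro j hj
    interval_cases j
    simp [scanF]
  | succ k ih =>
    obtain ⟨h1, ⟨jm, hjm, hmn⟩, hmnle, hb0, hpair, hatt⟩ := ih
    rw [scanF_succ, h1]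
    dsimp only
    have hp' : (∑ i ∈ Finset.range k, g i) + g k = ∑ i ∈ Finset.range (k+1), g i :=
      (Finset.sum_range_succ g k).symm
    rw [hp']
    refine ⟨rfl, ?_, ?_, le_trans hb0 (le_max_left _ _), ?_, ?_⟩
    · rcases min_choice (scanF g k b0).2.1 (∑ i ∈ Finset.range (k+1), g i) with h | h
      · exact ⟨jm, by omega, by rw [h, hmn]⟩
      · exact ⟨k+1, le_refl _, h⟩
    · intro j hj
      rcases Nat.lt_or_ge j (k+1) with hj' | hj'
      · exact le_trans (min_le_left _ _) (hmnle j (by omega))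
      · have : j = k + 1 := by omega
        subst this
        exact min_le_right _ _
    · intro c1 c2 hle hlt
      rcases Nat.lt_or_ge c2 k with h | h
      · exact le_trans (hpair c1 c2 hle h) (le_max_left _ _)
      · have hD : c2 = k := by omega
        rw [hD]
        have h1 : (scanF g k b0).2.1 ≤ ∑ i ∈ Finset.range c1, g i := hmnle c1 (by omega)
        have h2 : ∑ i ∈ Finset.range (k+1), g i - (scanF g k b0).2.1 ≤
            max (scanF g k b0).2.2 (∑ i ∈ Finset.range (k+1), g i - (scanF g k b0).2.1) :=
          le_max_right _ _
        omega
    · rcases max_choice (scanF g k b0).2.2 (∑ i ∈ Finset.range (k+1), g i - (scanF g k b0).2.1) with h | h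
      · rw [h]
        rcases hatt with h' | ⟨c1, c2, hle, hlt, h'⟩
        · exact Or.inl h'
        · exact Or.inr ⟨c1, c2, hle, by omega, h'⟩
      · rw [h, hmn]
        exact Or.inr ⟨jm, k, by omega, by omega, rfl⟩

-- B's prefix differences are A's branch values on the degenerate cases
theorem S_row (arr : List (List Int)) (r c1 c2 : Nat) (h : c1 ≤ c2) :
    S arr r r c1 c2 = RP arr r (c2+1) - RP arr r c1 := by
  by_cases hc : c1 = c2
  · subst hc
    simp [S, RP, Finset.sum_range_succ]
  · simp [S, hc]

theorem S_col (arr : List (List Int)) (c r1 r2 : Nat) (h : r1 ≤ r2) :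
    S arr r1 r2 c c = CP arr c (r2+1) - CP arr c r1 := by
  by_cases hr : r1 = r2
  · subst hr
    simp [S, CP, Finset.sum_range_succ]
  · simp [S, hr]

-- the border scan of B's third pass (q = top+bottom entry, f = column-sum minus q)
def scan2F (q f : Nat → Int) (k : Nat) (b0 : Int) : Int × Int × Int :=
  (List.range k).foldl (fun (t : Int × Int × Int) c =>
    (t.1 + q c,
     if 0 < c then max t.2.1 (f c - t.1) else f c - t.1,
     if 0 < c then max t.2.2 (f c + t.1 + q c + t.2.1) else t.2.2)) (0, 0, b0)

theorem scan2F_succ (q f : Nat → Int) (k : Nat) (b0 : Int) :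
    scan2F q f (k+1) b0 =
      ((scan2F q f k b0).1 + q k,
       if 0 < k then max (scan2F q f k b0).2.1 (f k - (scan2F q f k b0).1)
         else f k - (scan2F q f k b0).1,
       if 0 < k then max (scan2F q f k b0).2.2
           (f k + (scan2F q f k b0).1 + q k + (scan2F q f k b0).2.1)
         else (scan2F q f k b0).2.2) := by
  simp [scan2F, List.range_succ]

theorem scan2_spec (q f : Nat → Int) (k : Nat) (b0 : Int) :
    (scan2F q f k b0).1 = ∑ i ∈ Finset.range k, q i ∧
    (0 < k → (∃ c1, c1 < k ∧ (scan2F q f k b0).2.1 = f c1 - ∑ i ∈ Finset.range c1, q i) ∧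
      ∀ c1, c1 < k → f c1 - ∑ i ∈ Finset.range c1, q i ≤ (scan2F q f k b0).2.1) ∧
    b0 ≤ (scan2F q f k b0).2.2 ∧
    (∀ c1 c2, c1 < c2 → c2 < k →
      f c1 + f c2 + ∑ i ∈ Finset.range (c2+1), q i - ∑ i ∈ Finset.range c1, q i ≤ (scan2F q f k b0).2.2) ∧
    ((scan2F q f k b0).2.2 = b0 ∨ ∃ c1 c2, c1 < c2 ∧ c2 < k ∧
      (scan2F q f k b0).2.2 = f c1 + f c2 + ∑ i ∈ Finset.range (c2+1), q i - ∑ i ∈ Finset.range c1, q i) := by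
  induction k with
  | zero =>
    exact ⟨by simp [scan2F], by omega, by simp [scan2F], by omega, Or.inl (by simp [scan2F])⟩
  | succ k ih =>
    obtain ⟨h1, hleft, hb0, hpair, hatt⟩ := ih
    rw [scan2F_succ, h1]
    dsimp only
    have hp' : (∑ i ∈ Finset.range k, q i) + q k = ∑ i ∈ Finset.range (k+1), q i :=
      (Finset.sum_range_succ q k).symm
    rw [hp']
    by_cases hk : 0 < k
    · obtain ⟨⟨jl, hjl, hjleq⟩, hlb⟩ := hleft hk
      rw [if_pos hk, if_pos hk]
      refine ⟨rfl, ?_, le_trans hb0 (le_max_left _ _), ?_, ?_⟩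
      · intro _
        constructor
        · rcases max_choice (scan2F q f k b0).2.1 (f k - ∑ i ∈ Finset.range k, q i) with h | h
          · exact ⟨jl, by omega, by rw [h, hjleq]⟩
          · exact ⟨k, by omega, h⟩
        · intro c1 hc1
          rcases Nat.lt_or_ge c1 k with h | h
          · exact le_trans (hlb c1 h) (le_max_left _ _)
          · have : c1 = k := by omega
            subst this
            exact le_max_right _ _
      · intro c1 c2 hlt hlt2
        rcases Nat.lt_or_ge c2 k with h | h
        · exact le_trans (hpair c1 c2 hlt h) (le_max_left _ _)
        · have hD : c2 = k := by omega
          rw [hD]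
          have hA : f c1 - ∑ i ∈ Finset.range c1, q i ≤ (scan2F q f k b0).2.1 := hlb c1 (by omega)
          have hB : f k + (∑ i ∈ Finset.range k, q i) + q k + (scan2F q f k b0).2.1 ≤
              max (scan2F q f k b0).2.2
                (f k + (∑ i ∈ Finset.range k, q i) + q k + (scan2F q f k b0).2.1) :=
            le_max_right _ _
          have hC : (∑ i ∈ Finset.range k, q i) + q k = ∑ i ∈ Finset.range (k+1), q i :=
            (Finset.sum_range_succ q k).symm
          omega
      · rcases max_choice (scan2F q f k b0).2.2
            (f k + (∑ i ∈ Finset.range k, q i) + q k + (scan2F q f k b0).2.1) with h | h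
        · rw [h]
          rcases hatt with h' | ⟨c1, c2, hlt, hlt2, h'⟩
          · exact Or.inl h'
          · exact Or.inr ⟨c1, c2, hlt, by omega, h'⟩
        · rw [h, hjleq]
          refine Or.inr ⟨jl, k, by omega, by omega, ?_⟩
          have hC : (∑ i ∈ Finset.range k, q i) + q k = ∑ i ∈ Finset.range (k+1), q i :=
            (Finset.sum_range_succ q k).symm
          omega
    · have hk0 : k = 0 := by omega
      subst hk0
      rw [if_neg (by omega), if_neg (by omega)]
      refine ⟨rfl, ?_, hb0, by omega, ?_⟩
      · intro _
        refine ⟨⟨0, by omega, by norm_num⟩, ?_⟩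
        intro c1 hc1
        have : c1 = 0 := by omega
        subst this
        norm_num
      · rcases hatt with h' | ⟨c1, c2, hlt, hlt2, _⟩
        · exact Or.inl h'
        · omega

-- B's three passes, named (definitionally equal to solve_alt's code)
def rowsPassB (arr : List (List Int)) (b : Int) : Int :=
  (List.range arr.length).foldl (fun best r =>
    (scanF (fun c => pvGetI (pvGetR arr r) c) (pvGetR arr 0).length best).2.2) b

def colsPassB (arr : List (List Int)) (b : Int) : Int :=
  (List.range (pvGetR arr 0).length).foldl (fun best c =>
    (scanF (fun r => pvGetI (pvGetR arr r) c) arr.length best).2.2) b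

def bInner (arr : List (List Int)) (r1 r2 : Nat) (col : List Int) (b : Int) : Int × Int × Int :=
  scan2F (fun c => pvGetI (pvGetR arr r1) c + pvGetI (pvGetR arr r2) c)
         (fun c => pvGetI col c - (pvGetI (pvGetR arr r1) c + pvGetI (pvGetR arr r2) c))
         (pvGetR arr 0).length b

def bStep (arr : List (List Int)) (r1 : Nat) : (List Int × Int) → Nat → (List Int × Int) :=
  fun st r2 =>
    ((List.range (pvGetR arr 0).length).map (fun c => pvGetI st.1 c + pvGetI (pvGetR arr r2) c),
     (bInner arr r1 r2
       ((List.range (pvGetR arr 0).length).map (fun c => pvGetI st.1 c + pvGetI (pvGetR arr r2) c))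
       st.2).2.2)

def borderPassB (arr : List (List Int)) (b : Int) : Int :=
  (List.range arr.length).foldl (fun best r1 =>
    ((List.range' (r1+1) (arr.length - (r1+1))).foldl (bStep arr r1)
      ((List.range (pvGetR arr 0).length).map (fun c => pvGetI (pvGetR arr r1) c), best)).2) b

theorem solve_alt_eq (arr : List (List Int)) :
    solve_alt arr = borderPassB arr (colsPassB arr (rowsPassB arr (pvGetI (pvGetR arr 0) 0))) := rfl

-- the column-sum list the border pass maintains
def colL (arr : List (List Int)) (r1 r2 : Nat) : List Int :=
  (List.range (pvGetR arr 0).length).map (fun c => CP arr c (r2+1) - CP arr c r1)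

theorem col0_eq (arr : List (List Int)) (r1 : Nat) :
    (List.range (pvGetR arr 0).length).map (fun c => pvGetI (pvGetR arr r1) c)
      = colL arr r1 r1 := by
  unfold colL
  apply List.map_congr_left
  intro c _
  simp [CP, el, Finset.sum_range_succ]

theorem colstep_eq (arr : List (List Int)) (r1 rp : Nat) :
    (List.range (pvGetR arr 0).length).map
        (fun c => pvGetI (colL arr r1 rp) c + pvGetI (pvGetR arr (rp+1)) c)
      = colL arr r1 (rp+1) := by
  unfold colL
  apply List.map_congr_left
  intro c hc
  rw [pvGetI_map_range _ _ _ (List.mem_range.1 hc)]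
  simp [CP, el, Finset.sum_range_succ]
  ring

-- B's border candidate equals A's border branch value
theorem Val_eq_S (arr : List (List Int)) (r1 r2 c1 c2 : Nat) (hr : r1 < r2) (hc : c1 < c2) :
    (CP arr c1 (r2+1) - CP arr c1 r1 - (pvGetI (pvGetR arr r1) c1 + pvGetI (pvGetR arr r2) c1))
    + (CP arr c2 (r2+1) - CP arr c2 r1 - (pvGetI (pvGetR arr r1) c2 + pvGetI (pvGetR arr r2) c2))
    + ∑ i ∈ Finset.range (c2+1), (pvGetI (pvGetR arr r1) i + pvGetI (pvGetR arr r2) i)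
    - ∑ i ∈ Finset.range c1, (pvGetI (pvGetR arr r1) i + pvGetI (pvGetR arr r2) i)
    = S arr r1 r2 c1 c2 := by
  have h1 : ∀ k, ∑ i ∈ Finset.range k, (pvGetI (pvGetR arr r1) i + pvGetI (pvGetR arr r2) i)
      = RP arr r1 k + RP arr r2 k := by
    intro k
    simp [RP, el, Finset.sum_add_distrib]
  rw [h1, h1]
  rw [S, if_neg (by omega), if_neg (by omega), if_neg (by omega)]
  unfold el
  ring

theorem r2fold_spec (arr : List (List Int)) (r1 : Nat) : ∀ (len s : Nat) (b0 : Int),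
    r1 < s → s + len ≤ arr.length →
    b0 ≤ ((List.range' s len).foldl (bStep arr r1) (colL arr r1 (s-1), b0)).2 ∧
    (∀ y, (∃ r2 c1 c2, s ≤ r2 ∧ r2 < s + len ∧ c1 < c2 ∧ c2 < (pvGetR arr 0).length ∧
        y = S arr r1 r2 c1 c2) →
      y ≤ ((List.range' s len).foldl (bStep arr r1) (colL arr r1 (s-1), b0)).2) ∧
    (((List.range' s len).foldl (bStep arr r1) (colL arr r1 (s-1), b0)).2 = b0 ∨
      ∃ r2 c1 c2, s ≤ r2 ∧ r2 < s + len ∧ c1 < c2 ∧ c2 < (pvGetR arr 0).length ∧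
        ((List.range' s len).foldl (bStep arr r1) (colL arr r1 (s-1), b0)).2
          = S arr r1 r2 c1 c2) := by
  intro len
  induction len with
  | zero =>
    intro s b0 _ _
    exact ⟨le_refl _, by rintro y ⟨r2, c1, c2, h1, h2, _⟩; omega, Or.inl rfl⟩
  | succ len ih =>
    intro s b0 hs hsn
    have hcons : List.range' s (len+1) = s :: List.range' (s+1) len := by rw [List.range'_succ]
    rw [hcons, List.foldl_cons]
    -- the first step
    have hs1 : s - 1 + 1 = s := by omega
    have hcol : (List.range (pvGetR arr 0).length).map
        (fun c => pvGetI (colL arr r1 (s-1)) c + pvGetI (pvGetR arr s) c) = colL arr r1 s := by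
      have := colstep_eq arr r1 (s-1)
      rw [hs1] at this
      exact this
    have hstep : bStep arr r1 (colL arr r1 (s-1), b0) s
        = (colL arr r1 s, (bInner arr r1 s (colL arr r1 s) b0).2.2) := by
      unfold bStep
      dsimp only
      rw [hcol]
    rw [hstep]
    -- properties of the inner scan at row pair (r1, s)
    obtain ⟨_, _, ib0, ipair, iatt⟩ := scan2_spec
      (fun c => pvGetI (pvGetR arr r1) c + pvGetI (pvGetR arr s) c)
      (fun c => pvGetI (colL arr r1 s) c - (pvGetI (pvGetR arr r1) c + pvGetI (pvGetR arr s) c))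
      (pvGetR arr 0).length b0
    have hf : ∀ c, c < (pvGetR arr 0).length →
        pvGetI (colL arr r1 s) c = CP arr c (s+1) - CP arr c r1 := by
      intro c hc
      exact pvGetI_map_range _ _ _ hc
    have hval : ∀ c1 c2, c1 < c2 → c2 < (pvGetR arr 0).length →
        (pvGetI (colL arr r1 s) c1 - (pvGetI (pvGetR arr r1) c1 + pvGetI (pvGetR arr s) c1))
        + (pvGetI (colL arr r1 s) c2 - (pvGetI (pvGetR arr r1) c2 + pvGetI (pvGetR arr s) c2))
        + ∑ i ∈ Finset.range (c2+1), (pvGetI (pvGetR arr r1) i + pvGetI (pvGetR arr s) i)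
        - ∑ i ∈ Finset.range c1, (pvGetI (pvGetR arr r1) i + pvGetI (pvGetR arr s) i)
          = S arr r1 s c1 c2 := by
      intro c1 c2 hlt hlt2
      rw [hf c1 (by omega), hf c2 hlt2]
      exact Val_eq_S arr r1 s c1 c2 hs hlt
    set B1 := (bInner arr r1 s (colL arr r1 s) b0).2.2 with hB1
    have ib0' : b0 ≤ B1 := ib0
    have ipair' : ∀ c1 c2, c1 < c2 → c2 < (pvGetR arr 0).length → S arr r1 s c1 c2 ≤ B1 := by
      intro c1 c2 hlt hlt2
      rw [← hval c1 c2 hlt hlt2]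
      exact ipair c1 c2 hlt hlt2
    have iatt' : B1 = b0 ∨ ∃ c1 c2, c1 < c2 ∧ c2 < (pvGetR arr 0).length ∧
        B1 = S arr r1 s c1 c2 := by
      rcases iatt with h | ⟨c1, c2, hlt, hlt2, h⟩
      · exact Or.inl h
      · refine Or.inr ⟨c1, c2, hlt, hlt2, ?_⟩
        rw [← hval c1 c2 hlt hlt2]
        exact h
    -- the remaining rows via the induction hypothesis
    have hcolI : colL arr r1 s = colL arr r1 ((s+1)-1) := by norm_num
    obtain ⟨jh1, jh2, jh3⟩ := ih (s+1) B1 (by omega) (by omega)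
    rw [← hcolI] at jh1 jh2 jh3
    refine ⟨le_trans ib0' jh1, ?_, ?_⟩
    · rintro y ⟨r2, c1, c2, hr2, hr2', hlt, hlt2, rfl⟩
      rcases Nat.eq_or_lt_of_le hr2 with rfl | hgt
      · exact le_trans (ipair' c1 c2 hlt hlt2) jh1
      · exact jh2 _ ⟨r2, c1, c2, by omega, by omega, hlt, hlt2, rfl⟩
    · rcases jh3 with h | ⟨r2, c1, c2, hr2, hr2', hlt, hlt2, h⟩
      · rw [h]
        rcases iatt' with h' | ⟨c1, c2, hlt, hlt2, h'⟩
        · exact Or.inl h'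
        · exact Or.inr ⟨s, c1, c2, by omega, by omega, hlt, hlt2, h'⟩
      · exact Or.inr ⟨r2, c1, c2, by omega, by omega, hlt, hlt2, h⟩

theorem rowsPass_spec (arr : List (List Int)) (b : Int) :
    b ≤ rowsPassB arr b ∧
    (∀ y, (∃ r c1 c2, r < arr.length ∧ c1 ≤ c2 ∧ c2 < (pvGetR arr 0).length ∧
        y = S arr r r c1 c2) → y ≤ rowsPassB arr b) ∧
    (rowsPassB arr b = b ∨ ∃ r c1 c2, r < arr.length ∧ c1 ≤ c2 ∧ c2 < (pvGetR arr 0).length ∧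
        rowsPassB arr b = S arr r r c1 c2) := by
  obtain ⟨h1, h2, h3⟩ := foldl_bnd (List.range arr.length)
    (fun best r => (scanF (fun c => pvGetI (pvGetR arr r) c) (pvGetR arr 0).length best).2.2)
    (fun r y => ∃ c1 c2, c1 ≤ c2 ∧ c2 < (pvGetR arr 0).length ∧ y = S arr r r c1 c2) b
    (by
      intro r _ j
      obtain ⟨_, _, _, hb0, hpair, hatt⟩ :=
        scan_spec (fun c => pvGetI (pvGetR arr r) c) (pvGetR arr 0).length j
      have hRP : ∀ k, RP arr r k = ∑ i ∈ Finset.range k, pvGetI (pvGetR arr r) i := fun k => rfl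
      refine ⟨hb0, ?_, ?_⟩
      · rintro y ⟨c1, c2, hle, hlt, rfl⟩
        rw [S_row arr r c1 c2 hle, hRP, hRP]
        exact hpair c1 c2 hle hlt
      · rcases hatt with h | ⟨c1, c2, hle, hlt, h⟩
        · exact Or.inl h
        · exact Or.inr ⟨c1, c2, hle, hlt, by rw [S_row arr r c1 c2 hle, hRP, hRP]; exact h⟩)
  unfold rowsPassB
  refine ⟨h1, ?_, ?_⟩
  · rintro y ⟨r, c1, c2, hr, hrest⟩
    exact h2 r (List.mem_range.2 hr) y ⟨c1, c2, hrest⟩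
  · rcases h3 with h | ⟨r, hr, c1, c2, hrest⟩
    · exact Or.inl h
    · exact Or.inr ⟨r, c1, c2, List.mem_range.1 hr, hrest⟩

theorem colsPass_spec (arr : List (List Int)) (b : Int) :
    b ≤ colsPassB arr b ∧
    (∀ y, (∃ r1 r2 c, r1 ≤ r2 ∧ r2 < arr.length ∧ c < (pvGetR arr 0).length ∧
        y = S arr r1 r2 c c) → y ≤ colsPassB arr b) ∧
    (colsPassB arr b = b ∨ ∃ r1 r2 c, r1 ≤ r2 ∧ r2 < arr.length ∧ c < (pvGetR arr 0).length ∧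
        colsPassB arr b = S arr r1 r2 c c) := by
  obtain ⟨h1, h2, h3⟩ := foldl_bnd (List.range (pvGetR arr 0).length)
    (fun best c => (scanF (fun r => pvGetI (pvGetR arr r) c) arr.length best).2.2)
    (fun c y => ∃ r1 r2, r1 ≤ r2 ∧ r2 < arr.length ∧ y = S arr r1 r2 c c) b
    (by
      intro c _ j
      obtain ⟨_, _, _, hb0, hpair, hatt⟩ :=
        scan_spec (fun r => pvGetI (pvGetR arr r) c) arr.length j
      have hCP : ∀ k, CP arr c k = ∑ i ∈ Finset.range k, pvGetI (pvGetR arr i) c := fun k => rfl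
      refine ⟨hb0, ?_, ?_⟩
      · rintro y ⟨r1, r2, hle, hlt, rfl⟩
        rw [S_col arr c r1 r2 hle, hCP, hCP]
        exact hpair r1 r2 hle hlt
      · rcases hatt with h | ⟨r1, r2, hle, hlt, h⟩
        · exact Or.inl h
        · exact Or.inr ⟨r1, r2, hle, hlt, by rw [S_col arr c r1 r2 hle, hCP, hCP]; exact h⟩)
  unfold colsPassB
  refine ⟨h1, ?_, ?_⟩
  · rintro y ⟨r1, r2, c, hle, hlt, hc, rfl⟩
    exact h2 c (List.mem_range.2 hc) _ ⟨r1, r2, hle, hlt, rfl⟩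
  · rcases h3 with h | ⟨c, hc, r1, r2, hle, hlt, hrest⟩
    · exact Or.inl h
    · exact Or.inr ⟨r1, r2, c, hle, hlt, List.mem_range.1 hc, hrest⟩

theorem borderPass_spec (arr : List (List Int)) (b : Int) :
    b ≤ borderPassB arr b ∧
    (∀ y, (∃ r1 r2 c1 c2, r1 < r2 ∧ r2 < arr.length ∧ c1 < c2 ∧ c2 < (pvGetR arr 0).length ∧
        y = S arr r1 r2 c1 c2) → y ≤ borderPassB arr b) ∧
    (borderPassB arr b = b ∨ ∃ r1 r2 c1 c2, r1 < r2 ∧ r2 < arr.length ∧ c1 < c2 ∧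
        c2 < (pvGetR arr 0).length ∧ borderPassB arr b = S arr r1 r2 c1 c2) := by
  obtain ⟨h1, h2, h3⟩ := foldl_bnd (List.range arr.length)
    (fun best r1 => ((List.range' (r1+1) (arr.length - (r1+1))).foldl (bStep arr r1)
      ((List.range (pvGetR arr 0).length).map (fun c => pvGetI (pvGetR arr r1) c), best)).2)
    (fun r1 y => ∃ r2 c1 c2, r1 < r2 ∧ r2 < arr.length ∧ c1 < c2 ∧
      c2 < (pvGetR arr 0).length ∧ y = S arr r1 r2 c1 c2) b
    (by
      intro r1 hr1 j
      rw [List.mem_range] at hr1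
      dsimp only
      rw [col0_eq, show colL arr r1 r1 = colL arr r1 (r1+1-1) from by norm_num]
      obtain ⟨g1, g2, g3⟩ := r2fold_spec arr r1 (arr.length - (r1+1)) (r1+1) j (by omega) (by omega)
      refine ⟨g1, ?_, ?_⟩
      · rintro y ⟨r2, c1, c2, hlt, hlt2, hc, hc2, rfl⟩
        exact g2 _ ⟨r2, c1, c2, by omega, by omega, hc, hc2, rfl⟩
      · rcases g3 with h | ⟨r2, c1, c2, hr2, hr2', hc, hc2, h⟩
        · exact Or.inl h
        · exact Or.inr ⟨r2, c1, c2, by omega, by omega, hc, hc2, h⟩)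
  unfold borderPassB
  refine ⟨h1, ?_, ?_⟩
  · rintro y ⟨r1, r2, c1, c2, hlt, hlt2, hc, hc2, rfl⟩
    exact h2 r1 (List.mem_range.2 (by omega)) _ ⟨r2, c1, c2, hlt, hlt2, hc, hc2, rfl⟩
  · rcases h3 with h | ⟨r1, _, r2, c1, c2, hlt, hlt2, hc, hc2, h⟩
    · exact Or.inl h
    · exact Or.inr ⟨r1, r2, c1, c2, hlt, hlt2, hc, hc2, h⟩

theorem solve_alt_isMax (arr : List (List Int)) :
    IsMaxOf (solve_alt arr) (pvGetI (pvGetR arr 0) 0) (ValSet arr) := by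
  rw [solve_alt_eq]
  obtain ⟨ra, rb, rc⟩ := rowsPass_spec arr (pvGetI (pvGetR arr 0) 0)
  obtain ⟨ca, cb, cc⟩ := colsPass_spec arr (rowsPassB arr (pvGetI (pvGetR arr 0) 0))
  obtain ⟨ba, bb, bc⟩ :=
    borderPass_spec arr (colsPassB arr (rowsPassB arr (pvGetI (pvGetR arr 0) 0)))
  refine ⟨le_trans ra (le_trans ca ba), ?_, ?_⟩
  · rintro y ⟨r1, r2, c1, c2, hle, hlt, hle2, hlt2, rfl⟩
    rcases Nat.eq_or_lt_of_le hle with rfl | hr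
    · exact le_trans (rb _ ⟨r1, c1, c2, by omega, hle2, hlt2, rfl⟩) (le_trans ca ba)
    · rcases Nat.eq_or_lt_of_le hle2 with rfl | hc
      · exact le_trans (cb _ ⟨r1, r2, c1, by omega, hlt, hlt2, rfl⟩) ba
      · exact bb _ ⟨r1, r2, c1, c2, hr, hlt, hc, hlt2, rfl⟩
  · rcases bc with h | ⟨r1, r2, c1, c2, h1, h2, h3, h4, h⟩
    · rw [h]
      rcases cc with h' | ⟨r1, r2, c, h1, h2, h3, h'⟩
      · rw [h']
        rcases rc with h'' | ⟨r, c1, c2, h1, h2, h3, h''⟩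
        · exact Or.inl h''
        · exact Or.inr ⟨r, r, c1, c2, le_refl _, h1, h2, h3, h''⟩
      · exact Or.inr ⟨r1, r2, c, c, h1, h2, le_refl _, h3, h'⟩
    · exact Or.inr ⟨r1, r2, c1, c2, by omega, h2, by omega, h4, h⟩

-- ===== VERDICT (by name: the statement is the Claim_ definition above) =====
theorem solve_spec : Claim_equal_solve := by
  intro arr _ _
  show solve arr = solve_alt arr
  exact isMaxOf_unique (solve_isMax arr) (solve_alt_isMax arr)
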